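-- pv_equiv track=rewrite | github.com/Quokka0903/PGMS | Level_1/lv1_정수제곱근판별.py | solution
-- ===== SOURCE A (Python) =====
-- def solution(n):
--
--     if n == 1:
--         answer = 4
--     elif n == 2:
--         answer = -1
--     else:
--         left = 2
--         right = n
--         answer = -1
--         while left < right:
--             middle = (left + right) // 2
--             if middle**2 > n:
--                 right = middle
--             elif middle**2 < n:
--                 left = middle + 1
--             else:
--                 answer = (middle + 1) ** 2
--                 break
--
--     return answer
-- ===== SOURCE B (Python) =====
-- import math
--
-- def solution(n):
--     if n < 1:
--         return -1
--     r = math.isqrt(n)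
--     return (r + 1) ** 2 if r * r == n else -1
-- ===== Notes on version B (the rewrite author's own statement) =====
-- stated objective: simpler
-- what changed: Replaces the explicit binary-search loop (and the n==1/n==2 special cases) with a direct math.isqrt computation and a single perfect-square test.
import Mathlib
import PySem

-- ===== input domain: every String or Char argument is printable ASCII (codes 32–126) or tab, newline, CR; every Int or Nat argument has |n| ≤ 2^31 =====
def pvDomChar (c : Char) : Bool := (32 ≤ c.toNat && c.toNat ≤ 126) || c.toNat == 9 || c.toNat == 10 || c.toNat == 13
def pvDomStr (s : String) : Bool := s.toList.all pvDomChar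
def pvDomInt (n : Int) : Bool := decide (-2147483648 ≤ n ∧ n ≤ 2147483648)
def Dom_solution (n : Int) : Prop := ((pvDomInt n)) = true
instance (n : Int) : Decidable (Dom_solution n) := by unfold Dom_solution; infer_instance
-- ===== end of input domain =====

-- B replaces A's binary-search loop (and its n==1/n==2 special cases) with one integer-sqrt
-- computation and a single perfect-square test (objective: simpler).

-- ===== PORT A =====
-- the while-loop of A: state (left, right, answer = -1); break returns directly
def solutionLoop (n left right : Int) : Int :=
  if left < right then
    let middle := PySem.Int.floordiv (left + right) 2
    if middle ^ 2 > n then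
      solutionLoop n left middle
    else if middle ^ 2 < n then
      solutionLoop n (middle + 1) right
    else
      (middle + 1) ^ 2
  else
    -1
termination_by (right - left).toNat
decreasing_by
  · have h2 : PySem.Int.floordiv (left + right) 2 < right :=
      (PySem.Int.floordiv_lt_iff_lt_mul (by omega)).mpr (by omega)
    omega
  · have h := PySem.Int.floordiv_two_mid_bounds (lo := left) (hi := right) (by omega)
    omega

def solution (n : Int) : Int :=
  if n = 1 then 4
  else if n = 2 then -1
  else solutionLoop n 2 n

-- ===== PORT B =====
-- math.isqrt ported as Nat.sqrt (exact for n ≥ 0; the n < 1 guard comes first, as in Source B)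
def solution_alt (n : Int) : Int :=
  if n < 1 then -1
  else
    let r : Int := (Nat.sqrt n.toNat : Int)
    if r * r = n then (r + 1) ^ 2 else -1

-- ===== PRECONDITION & SPEC =====
def Spec_solution (n : Int) (out : Int) : Prop := out = solution_alt n
instance (n : Int) (out : Int) : Decidable (Spec_solution n out) := by unfold Spec_solution; infer_instance

-- ===== CLAIM (what is proved, stated in full; the proofs are below) =====
def Claim_equal_solution : Prop := ∀ (n : Int), Dom_solution n → Spec_solution n (solution n)

-- ===== LEMMAS AND PROOFS =====

-- s = isqrt n (as Int) for n ≥ 0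
lemma sqrt_nonneg' (n : Int) : (0 : Int) ≤ (Nat.sqrt n.toNat : Int) := Int.natCast_nonneg _

-- uniqueness of the nonnegative square root
lemma sqrt_of_sq (m n : Int) (hm : 0 ≤ m) (h : m * m = n) :
    (Nat.sqrt n.toNat : Int) = m := by
  have hmm : ((m.toNat * m.toNat : Nat) : Int) = n := by
    push_cast
    rw [Int.toNat_of_nonneg hm]
    exact h
  have hn : n.toNat = m.toNat * m.toNat := by omega
  rw [hn, ← pow_two, Nat.sqrt_eq']
  omega

lemma sq_ge_two (s n : Int) (_hn : 3 ≤ n) (hs : 0 ≤ s) (h : s * s = n) : 2 ≤ s := by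
  nlinarith

-- the loop computes: (s+1)² if n is a perfect square with root s in [l, r), else -1
lemma loop_eq (n : Int) (hn : 3 ≤ n) :
    ∀ (k : Nat) (l r : Int), (r - l).toNat = k → 2 ≤ l →
      solutionLoop n l r =
        (if (Nat.sqrt n.toNat : Int) * (Nat.sqrt n.toNat : Int) = n
            ∧ l ≤ (Nat.sqrt n.toNat : Int) ∧ (Nat.sqrt n.toNat : Int) < r
         then ((Nat.sqrt n.toNat : Int) + 1) ^ 2 else -1) := by
  intro k
  induction k using Nat.strong_induction_on with
  | _ k ih =>
    intro l r hk hl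
    set s : Int := (Nat.sqrt n.toNat : Int) with hsdef
    have hs0 : 0 ≤ s := sqrt_nonneg' n
    rw [solutionLoop]
    by_cases hlr : l < r
    · simp only [if_pos hlr]
      set m : Int := PySem.Int.floordiv (l + r) 2 with hm
      have hmb := PySem.Int.floordiv_two_mid_bounds (lo := l) (hi := r) (by omega)
      have hmr : m < r := (PySem.Int.floordiv_lt_iff_lt_mul (by omega)).mpr (by omega)
      have hml : l ≤ m := hmb.1
      by_cases h1 : m ^ 2 > n
      · rw [if_pos h1, ih (r := m) (l := l) (m - l).toNat (by omega) rfl hl]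
        by_cases hsq : s * s = n
        · have hsm : s < m := by nlinarith [sq_nonneg (m - s)]
          simp only [hsq, true_and]
          congr 1
          simp only [eq_iff_iff]
          constructor <;> rintro ⟨a, b⟩ <;> exact ⟨a, by omega⟩
        · simp [hsq]
      · rw [if_neg h1]
        by_cases h2 : m ^ 2 < n
        · rw [if_pos h2, ih (r := r) (l := m + 1) (r - (m + 1)).toNat (by omega) rfl (by omega)]
          by_cases hsq : s * s = n
          · have hms : m < s := by nlinarith [sq_nonneg (m - s)]
            simp only [hsq, true_and]
            congr 1
            simp only [eq_iff_iff]
            constructor <;> rintro ⟨a, b⟩ <;> exact ⟨by omega, b⟩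
          · simp [hsq]
        · rw [if_neg h2]
          have hmn : m * m = n := by nlinarith
          have hsm : s = m := by rw [hsdef]; exact sqrt_of_sq m n (by omega) hmn
          rw [if_pos ⟨by rw [hsm]; exact hmn, by omega, by omega⟩, hsm]
    · simp only [if_neg hlr]
      rw [if_neg (by rintro ⟨_, a, b⟩; omega)]

-- ===== VERDICT (by name: the statement is the Claim_ definition above) =====
theorem solution_spec : Claim_equal_solution := by
  intro n _
  unfold Spec_solution solution solution_alt
  by_cases h1 : n = 1
  · subst h1; norm_num
  · rw [if_neg h1]
    by_cases h2 : n = 2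
    · subst h2
      rw [if_pos rfl]
      have hs : Nat.sqrt 2 = 1 := by
        have h1 := Nat.sqrt_lt_self (by norm_num : 1 < 2)
        have h2 := Nat.sqrt_pos.mpr (by norm_num : 0 < 2)
        omega
      rw [show Int.toNat 2 = 2 from rfl, hs]
      norm_num
    · rw [if_neg h2]
      by_cases h0 : n < 1
      · rw [if_pos h0, solutionLoop, if_neg (by omega)]
      · rw [if_neg h0]
        have hn : 3 ≤ n := by omega
        set s : Int := (Nat.sqrt n.toNat : Int) with hsdef
        have hs0 : 0 ≤ s := sqrt_nonneg' n
        rw [loop_eq n hn (n - 2).toNat 2 n rfl (by omega)]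
        by_cases hsq : s * s = n
        · have hs2 : 2 ≤ s := sq_ge_two s n hn hs0 hsq
          have hsn : s < n := by nlinarith
          rw [if_pos ⟨hsq, hs2, hsn⟩]
          simp only [← hsdef]
          rw [if_pos hsq]
        · rw [if_neg (by rintro ⟨a, _⟩; exact hsq a)]
          simp [hsq]
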